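-- pv_equiv track=rewrite | github.com/lostbean/jido_composer | bench/travelplanner/scripts/generate_python_parity_fixture.py | is_valid_transportation
-- ===== SOURCE A (Python) =====
-- def detect_transport_mode(entry):
--     """Detect transport mode from entry string."""
--     if not entry or entry == "-":
--         return None
--     entry_lower = entry.lower()
--     if entry_lower.startswith("flight"):
--         return "flight"
--     elif "self-driving" in entry_lower or "self-drive" in entry_lower:
--         return "self_driving"
--     elif entry_lower.startswith("taxi"):
--         return "taxi"
--     return None
--
-- def is_valid_transportation(plan, task, db):
--     """No mixing flight + self-driving for inter-city transport."""
--     modes = set()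
--     for day in plan:
--         entry = day.get("transportation", "-")
--         if entry == "-":
--             continue
--         mode = detect_transport_mode(entry)
--         if mode and mode != "taxi":
--             modes.add(mode)
--
--     if "flight" in modes and "self_driving" in modes:
--         return False
--     return True
-- ===== SOURCE B (Python) =====
-- def detect_transport_mode(entry):
--     """Detect transport mode from entry string."""
--     if not entry or entry == "-":
--         return None
--     entry_lower = entry.lower()
--     if entry_lower.startswith("flight"):
--         return "flight"
--     elif "self-driving" in entry_lower or "self-drive" in entry_lower:
--         return "self_driving"
--     elif entry_lower.startswith("taxi"):
--         return "taxi"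
--     return None
--
-- def is_valid_transportation(plan, task, db):
--     """No mixing flight + self-driving for inter-city transport."""
--     has_flight = any(
--         detect_transport_mode(day.get("transportation", "-")) == "flight"
--         for day in plan)
--     has_self_driving = any(
--         detect_transport_mode(day.get("transportation", "-")) == "self_driving"
--         for day in plan)
--     return not (has_flight and has_self_driving)
-- ===== Notes on version B (the rewrite author's own statement) =====
-- stated objective: simpler
-- what changed: Replaces the set-accumulation loop and final membership test with two independent short-circuiting any() presence checks for flight and self-driving.
import Mathlib
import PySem

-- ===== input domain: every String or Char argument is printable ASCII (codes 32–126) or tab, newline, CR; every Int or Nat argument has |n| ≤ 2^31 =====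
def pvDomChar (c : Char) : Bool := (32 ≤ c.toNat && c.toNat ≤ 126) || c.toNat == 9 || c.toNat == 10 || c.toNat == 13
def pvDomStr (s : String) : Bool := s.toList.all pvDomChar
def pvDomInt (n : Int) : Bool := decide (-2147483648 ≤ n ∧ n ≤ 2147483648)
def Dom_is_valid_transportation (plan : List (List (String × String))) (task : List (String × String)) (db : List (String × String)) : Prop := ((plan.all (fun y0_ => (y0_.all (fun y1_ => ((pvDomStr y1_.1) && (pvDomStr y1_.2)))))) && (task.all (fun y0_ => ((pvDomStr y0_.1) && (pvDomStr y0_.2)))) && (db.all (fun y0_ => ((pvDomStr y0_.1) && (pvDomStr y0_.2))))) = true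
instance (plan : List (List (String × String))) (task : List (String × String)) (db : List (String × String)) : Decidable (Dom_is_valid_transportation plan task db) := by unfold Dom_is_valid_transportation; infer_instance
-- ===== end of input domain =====

-- B replaces A's set-accumulation loop by two independent any() presence checks (simpler decomposition; same O(n) cost).

-- ===== PORT A =====
-- shared helper: both Pythons define detect_transport_mode identically
def detect_transport_mode (entry : String) : Option String :=
  if entry = "" ∨ entry = "-" then none
  else
    let entry_lower := PySem.Str.lower entry
    if PySem.Str.startswith entry_lower "flight" then some "flight"
    else if PySem.Str.isIn "self-driving" entry_lower || PySem.Str.isIn "self-drive" entry_lower then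
      some "self_driving"
    else if PySem.Str.startswith entry_lower "taxi" then some "taxi"
    else none

def is_valid_transportation (plan : List (List (String × String))) (task : List (String × String)) (db : List (String × String)) : Bool :=
  let modes : PySem.Set String :=
    plan.foldl (fun modes day =>
      let entry := PySem.Dict.getD (PySem.Dict.ofList day) "transportation" "-"
      if entry = "-" then modes
      else
        match detect_transport_mode entry with
        | none => modes
        | some mode =>           -- 'if mode and mode != "taxi"': truthy = non-empty string
          if mode ≠ "" ∧ mode ≠ "taxi" then PySem.Set.add modes mode else modes)
      PySem.Set.empty
  if PySem.Set.contains modes "flight" && PySem.Set.contains modes "self_driving" then false else true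

-- ===== PORT B =====
def is_valid_transportation_alt (plan : List (List (String × String))) (task : List (String × String)) (db : List (String × String)) : Bool :=
  let has_flight := plan.any (fun day =>
    detect_transport_mode (PySem.Dict.getD (PySem.Dict.ofList day) "transportation" "-") == some "flight")
  let has_self_driving := plan.any (fun day =>
    detect_transport_mode (PySem.Dict.getD (PySem.Dict.ofList day) "transportation" "-") == some "self_driving")
  !(has_flight && has_self_driving)

-- ===== PRECONDITION & SPEC =====
def Spec_is_valid_transportation (plan : List (List (String × String))) (task : List (String × String)) (db : List (String × String)) (out : Bool) : Prop := out = is_valid_transportation_alt plan task db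
instance (plan : List (List (String × String))) (task : List (String × String)) (db : List (String × String)) (out : Bool) : Decidable (Spec_is_valid_transportation plan task db out) := by unfold Spec_is_valid_transportation; infer_instance

-- ===== CLAIM (what is proved, stated in full; the proofs are below) =====
def Claim_equal_is_valid_transportation : Prop := ∀ (plan : List (List (String × String))) (task : List (String × String)) (db : List (String × String)), Dom_is_valid_transportation plan task db → Spec_is_valid_transportation plan task db (is_valid_transportation plan task db)

-- ===== LEMMAS AND PROOFS =====

-- A's fold step, named for the proofs
def pvStep (modes : PySem.Set String) (day : List (String × String)) : PySem.Set String :=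
  let entry := PySem.Dict.getD (PySem.Dict.ofList day) "transportation" "-"
  if entry = "-" then modes
  else
    match detect_transport_mode entry with
    | none => modes
    | some mode =>
      if mode ≠ "" ∧ mode ≠ "taxi" then PySem.Set.add modes mode else modes

theorem contains_pvStep (modes : PySem.Set String) (day : List (String × String)) (v : String)
    (hv : v ≠ "" ∧ v ≠ "taxi") :
    PySem.Set.contains (pvStep modes day) v =
      (PySem.Set.contains modes v ||
        (detect_transport_mode (PySem.Dict.getD (PySem.Dict.ofList day) "transportation" "-") == some v)) := by
  unfold pvStep
  set entry := PySem.Dict.getD (PySem.Dict.ofList day) "transportation" "-" with hentry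
  by_cases hd : entry = "-"
  · simp [hd, detect_transport_mode]
  · simp only [if_neg hd]
    cases h : detect_transport_mode entry with
    | none => simp
    | some m =>
      by_cases hm : m ≠ "" ∧ m ≠ "taxi"
      · simp only [if_pos hm]
        by_cases hmv : m = v
        · subst hmv; simp [PySem.Set.mem_add]
        · simp [PySem.Set.mem_add, hmv, Ne.symm hmv]
      · -- m is "" or "taxi"; neither equals v
        have : m ≠ v := by
          rcases not_and_or.mp hm with h1 | h1 <;>
            simp only [not_not] at h1 <;> subst h1 <;> tauto
        simp [hm, this]

theorem contains_foldl (plan : List (List (String × String))) (modes : PySem.Set String)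
    (v : String) (hv : v ≠ "" ∧ v ≠ "taxi") :
    PySem.Set.contains (plan.foldl pvStep modes) v =
      (PySem.Set.contains modes v ||
        plan.any (fun day =>
          detect_transport_mode (PySem.Dict.getD (PySem.Dict.ofList day) "transportation" "-") == some v)) := by
  induction plan generalizing modes with
  | nil => simp
  | cons d t ih =>
    simp only [List.foldl_cons, List.any_cons]
    rw [ih, contains_pvStep _ _ _ hv]
    cases PySem.Set.contains modes v <;> simp

-- ===== VERDICT (by name: the statement is the Claim_ definition above) =====
theorem is_valid_transportation_spec : Claim_equal_is_valid_transportation := by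
  intro plan task db _
  unfold Spec_is_valid_transportation is_valid_transportation is_valid_transportation_alt
  show (if PySem.Set.contains (plan.foldl pvStep PySem.Set.empty) "flight" &&
          PySem.Set.contains (plan.foldl pvStep PySem.Set.empty) "self_driving" then false else true) = _
  rw [contains_foldl plan PySem.Set.empty "flight" (by decide),
      contains_foldl plan PySem.Set.empty "self_driving" (by decide)]
  cases hF : plan.any (fun day => detect_transport_mode (PySem.Dict.getD (PySem.Dict.ofList day) "transportation" "-") == some "flight") <;>
    cases hS : plan.any (fun day => detect_transport_mode (PySem.Dict.getD (PySem.Dict.ofList day) "transportation" "-") == some "self_driving") <;>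
      simp [PySem.Set.empty, PySem.Set.contains]
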